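-- pv_equiv track=rewrite | github.com/ZHR-HEU/Long-tail-SEI-OSR | data_utils.py | _canonize_sampler_name
-- ===== SOURCE A (Python) =====
-- from typing import Any, Callable, Dict, Iterable, List, Optional, Sequence, Tuple
--
-- _SAMPLER_ALIASES: Dict[str, Tuple[str, ...]] = {
--     "none": ("none", "natural", "instance", None),
--     "inv_freq": ("inv_freq", "balanced", "weighted"),
--     "class_uniform": ("class_uniform", "balance", "class-balanced"),
--     "sqrt": ("sqrt", "square", "square_root"),
--     "power": ("power",),
--     "progressive_power": ("progressive_power", "progressive"),
-- }
--
-- def _canonize_sampler_name(name: Optional[str]) -> str: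
--     if name is None:
--         return "none"
--     key = str(name).lower()
--     for canonical, aliases in _SAMPLER_ALIASES.items():
--         if key in [a for a in aliases if a is not None]:
--             return canonical
--     if key in _SAMPLER_ALIASES:
--         return key
--     raise ValueError(f"Unsupported sampler name: {name}. Valid: {list(_SAMPLER_ALIASES.keys())}")
-- ===== SOURCE B (Python) =====
-- from typing import Dict, Optional, Tuple
--
-- _SAMPLER_ALIASES: Dict[str, Tuple[str, ...]] = {
--     "none": ("none", "natural", "instance", None),
--     "inv_freq": ("inv_freq", "balanced", "weighted"),
--     "class_uniform": ("class_uniform", "balance", "class-balanced"),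
--     "sqrt": ("sqrt", "square", "square_root"),
--     "power": ("power",),
--     "progressive_power": ("progressive_power", "progressive"),
-- }
--
-- # Reverse mapping built once: alias -> canonical (None aliases skipped).
-- _REVERSE: Dict[str, str] = {
--     alias: canonical
--     for canonical, aliases in _SAMPLER_ALIASES.items()
--     for alias in aliases
--     if alias is not None
-- }
--
-- def _canonize_sampler_name(name: Optional[str]) -> str:
--     if name is None:
--         return "none"
--     canon = _REVERSE.get(str(name).lower())
--     if canon is not None:
--         return canon
--     raise ValueError(f"Unsupported sampler name: {name}. Valid: {list(_SAMPLER_ALIASES.keys())}")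
-- ===== Notes on version B (the rewrite author's own statement) =====
-- stated objective: idiomatic
-- what changed: Replaces the per-call scan over all canonical entries (each building a filtered alias list) with a module-level reverse dict alias->canonical built once, so lookup is a single dict probe; the redundant final canonical-key fallback disappears since every canonical name is listed among its own aliases.
import Mathlib
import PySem

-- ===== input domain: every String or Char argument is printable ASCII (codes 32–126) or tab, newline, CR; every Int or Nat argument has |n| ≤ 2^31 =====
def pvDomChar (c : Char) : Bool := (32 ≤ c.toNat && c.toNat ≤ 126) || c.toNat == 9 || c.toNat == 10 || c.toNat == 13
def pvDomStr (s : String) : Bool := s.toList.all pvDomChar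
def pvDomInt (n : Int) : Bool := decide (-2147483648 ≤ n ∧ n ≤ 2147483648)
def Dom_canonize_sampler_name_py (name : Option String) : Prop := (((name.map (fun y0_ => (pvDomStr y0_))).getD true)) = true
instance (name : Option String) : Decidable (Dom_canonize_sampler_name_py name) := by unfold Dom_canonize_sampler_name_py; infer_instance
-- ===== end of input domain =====

-- B replaces A's per-call scan over the alias table with a reverse dict alias→canonical built once and a single lookup (idiomatic; return value only).

-- ===== PORT A =====
-- the module constant _SAMPLER_ALIASES, in Python's insertion order
def pvSamplerAliases : List (String × List (Option String)) :=
  [("none", [some "none", some "natural", some "instance", none]),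
   ("inv_freq", [some "inv_freq", some "balanced", some "weighted"]),
   ("class_uniform", [some "class_uniform", some "balance", some "class-balanced"]),
   ("sqrt", [some "sqrt", some "square", some "square_root"]),
   ("power", [some "power"]),
   ("progressive_power", [some "progressive_power", some "progressive"])]

-- the 'for canonical, aliases in _SAMPLER_ALIASES.items()' loop: first entry whose
-- non-None aliases contain key ([a for a in aliases if a is not None] = filterMap id)
def pvScanAliases (key : String) : List (String × List (Option String)) → Option String
  | [] => none
  | (canonical, aliases) :: rest =>
      if key ∈ aliases.filterMap id then some canonical else pvScanAliases key rest

-- the body after 'key = str(name).lower()': scan, then the 'key in _SAMPLER_ALIASES' check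
def pvCanonA (key : String) : String :=
  match pvScanAliases key pvSamplerAliases with
  | some canonical => canonical
  | none =>
      if key ∈ pvSamplerAliases.map Prod.fst then key
      else ""  -- Python raises ValueError here; excluded by Pre_

def canonize_sampler_name_py (name : Option String) : String :=
  match name with
  | none => "none"
  | some n => pvCanonA (PySem.Str.lower n)

-- ===== PORT B =====
-- _REVERSE = {alias: canonical for canonical, aliases in _SAMPLER_ALIASES.items() for alias in aliases if alias is not None}
def pvReverse : PySem.Dict String String :=
  pvSamplerAliases.foldl
    (fun d p => (p.2.filterMap id).foldl (fun d a => d.insert a p.1) d)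
    PySem.Dict.empty

-- canon = _REVERSE.get(key); return canon unless it is None
def pvCanonB (key : String) : String :=
  match pvReverse.get? key with
  | some canon => canon
  | none => ""  -- Python raises ValueError here; excluded by Pre_

def canonize_sampler_name_py_alt (name : Option String) : String :=
  match name with
  | none => "none"
  | some n => pvCanonB (PySem.Str.lower n)

-- ===== PRECONDITION & SPEC =====
-- Pre_ excludes exactly the inputs on which A raises ValueError: a non-None name whose
-- lowercase form is not one of the known aliases.
def pvValidKeys : List String :=
  ["none", "natural", "instance", "inv_freq", "balanced", "weighted",
   "class_uniform", "balance", "class-balanced", "sqrt", "square", "square_root",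
   "power", "progressive_power", "progressive"]

def Pre_canonize_sampler_name_py (name : Option String) : Prop :=
  ((name.map (fun n => decide (PySem.Str.lower n ∈ pvValidKeys))).getD true) = true

instance (name : Option String) : Decidable (Pre_canonize_sampler_name_py name) := by
  unfold Pre_canonize_sampler_name_py; infer_instance

def pvWitness_canonize_sampler_name_py : Option String := some "Balanced"

def Spec_canonize_sampler_name_py (name : Option String) (out : String) : Prop := out = canonize_sampler_name_py_alt name
instance (name : Option String) (out : String) : Decidable (Spec_canonize_sampler_name_py name out) := by unfold Spec_canonize_sampler_name_py; infer_instance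

-- ===== CLAIM (what is proved, stated in full; the proofs are below) =====
def Claim_equal_canonize_sampler_name_py : Prop := ∀ (name : Option String), Dom_canonize_sampler_name_py name → Pre_canonize_sampler_name_py name → Spec_canonize_sampler_name_py name (canonize_sampler_name_py name)

-- ===== LEMMAS AND PROOFS =====

-- ===== VERDICT (by name: the statement is the Claim_ definition above) =====
-- A's scan and B's dict probe agree on every key the table knows.
theorem pvCanon_agree (k : String) (hk : k ∈ pvValidKeys) : pvCanonA k = pvCanonB k := by
  fin_cases hk <;> decide

theorem canonize_sampler_name_py_spec : Claim_equal_canonize_sampler_name_py := by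
  intro name _ hpre
  unfold Spec_canonize_sampler_name_py
  match name with
  | none => rfl
  | some n =>
      unfold Pre_canonize_sampler_name_py at hpre
      simp only [Option.map_some, Option.getD_some, decide_eq_true_eq] at hpre
      exact pvCanon_agree _ hpre
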